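-- pv_equiv track=rewrite | github.com/poseclx/devlens | devlens/languages.py | _extract_function_body
-- ===== SOURCE A (Python) =====
-- def _extract_function_body(source: str, start_pos: int) -> tuple[str, int]:
--     """Extract function body from opening { to matching }."""
--     brace_pos = source.find("{", start_pos)
--     if brace_pos == -1:
--         return "", start_pos
--     depth = 0
--     i = brace_pos
--     in_string = False
--     string_char = None
--     prev = None
--     while i < len(source):
--         ch = source[i]
--         if in_string:
--             if ch == string_char and prev != "\\":
--                 in_string = False
--         else:
--             if ch in ('"', "'", "`"):
--                 in_string = True
--                 string_char = ch
--             elif ch == "{":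
--                 depth += 1
--             elif ch == "}":
--                 depth -= 1
--                 if depth == 0:
--                     return source[brace_pos : i + 1], i
--         prev = ch
--         i += 1
--     return source[brace_pos:], len(source)
-- ===== SOURCE B (Python) =====
-- def _extract_function_body(source: str, start_pos: int) -> tuple[str, int]:
--     """Extract function body from opening { to matching }."""
--     brace_pos = source.find("{", start_pos)
--     if brace_pos == -1:
--         return "", start_pos
--     # Pass 1: index all braces that lie outside string literals.
--     events = []
--     in_string = False
--     string_char = None
--     prev = None
--     for i in range(brace_pos, len(source)):
--         ch = source[i]
--         if in_string:
--             if ch == string_char and prev != "\\":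
--                 in_string = False
--         else:
--             if ch in ('"', "'", "`"):
--                 in_string = True
--                 string_char = ch
--             elif ch == "{" or ch == "}":
--                 events.append((i, ch))
--         prev = ch
--     # Pass 2: prefix-sum the brace events to find the matching close.
--     depth = 0
--     for i, ch in events:
--         depth += 1 if ch == "{" else -1
--         if ch == "}" and depth == 0:
--             return source[brace_pos : i + 1], i
--     return source[brace_pos:], len(source)
-- ===== Notes on version B (the rewrite author's own statement) =====
-- stated objective: alternative
-- what changed: Replaced A's single scan that interleaves string tracking with brace counting by two staged passes: pass 1 builds an index of the braces lying outside string literals, pass 2 prefix-sums that event list to find the first closing brace where depth returns to 0.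
import Mathlib
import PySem

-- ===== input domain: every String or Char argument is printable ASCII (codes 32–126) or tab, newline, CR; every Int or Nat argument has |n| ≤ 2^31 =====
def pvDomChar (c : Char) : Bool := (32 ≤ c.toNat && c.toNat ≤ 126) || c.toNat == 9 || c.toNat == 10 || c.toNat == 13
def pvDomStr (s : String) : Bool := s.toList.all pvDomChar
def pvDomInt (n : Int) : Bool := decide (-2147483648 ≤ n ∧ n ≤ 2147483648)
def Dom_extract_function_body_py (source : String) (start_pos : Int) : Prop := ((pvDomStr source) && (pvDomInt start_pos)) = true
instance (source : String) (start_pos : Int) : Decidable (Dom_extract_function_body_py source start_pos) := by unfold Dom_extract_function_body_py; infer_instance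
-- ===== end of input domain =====

-- B restructures A's single interleaved scan into two staged passes (index the braces
-- outside strings, then prefix-sum that event list); same cost, objective: alternative.


-- ===== PORT A =====
-- A's while loop: state (i, depth, in_string, string_char, prev), iterated over the chars
-- from position i (the list argument is source[i:]); src/bp fixed for the slices.
def pvLoopA (src : List Char) (bp : Nat) :
    List Char → Nat → Int → Bool → Option Char → Option Char → String × Int
  | [], _, _, _, _, _ =>
      (String.ofList (PySem.List.slice src (some (bp : Int)) none), (src.length : Int))
  | ch :: rest, i, depth, inString, stringChar, prev =>
      if inString then
        if some ch = stringChar ∧ prev ≠ some '\\' then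
          pvLoopA src bp rest (i + 1) depth false stringChar (some ch)
        else
          pvLoopA src bp rest (i + 1) depth true stringChar (some ch)
      else
        if ch = '"' ∨ ch = '\'' ∨ ch = '`' then
          pvLoopA src bp rest (i + 1) depth true (some ch) (some ch)
        else if ch = '{' then
          pvLoopA src bp rest (i + 1) (depth + 1) false stringChar (some ch)
        else if ch = '}' then
          if depth - 1 = 0 then
            (String.ofList (PySem.List.slice src (some (bp : Int)) (some ((i : Int) + 1))), (i : Int))
          else
            pvLoopA src bp rest (i + 1) (depth - 1) false stringChar (some ch)
        else
          pvLoopA src bp rest (i + 1) depth false stringChar (some ch)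

def extract_function_body_py (source : String) (start_pos : Int) : String × Int :=
  let cs := source.toList
  let brace := PySem.Str.findFrom source "{" start_pos none
  if brace = -1 then ("", start_pos)
  else pvLoopA cs brace.toNat (cs.drop brace.toNat) brace.toNat 0 false none none

-- ===== PORT B =====
-- B pass 1: index the braces outside string literals; state (in_string, string_char, prev),
-- the list argument is source[i:]; emits the (index, char) event list.
def pvEvents : List Char → Nat → Bool → Option Char → Option Char → List (Nat × Char)
  | [], _, _, _, _ => []
  | ch :: rest, i, inString, stringChar, prev =>
      if inString then
        if some ch = stringChar ∧ prev ≠ some '\\' then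
          pvEvents rest (i + 1) false stringChar (some ch)
        else
          pvEvents rest (i + 1) true stringChar (some ch)
      else
        if ch = '"' ∨ ch = '\'' ∨ ch = '`' then
          pvEvents rest (i + 1) true (some ch) (some ch)
        else if ch = '{' ∨ ch = '}' then
          (i, ch) :: pvEvents rest (i + 1) false stringChar (some ch)
        else
          pvEvents rest (i + 1) false stringChar (some ch)

-- B pass 2: prefix-sum of the event list; return at the first close where depth hits 0.
def pvScan (src : List Char) (bp : Nat) : List (Nat × Char) → Int → String × Int
  | [], _ =>
      (String.ofList (PySem.List.slice src (some (bp : Int)) none), (src.length : Int))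
  | (i, ch) :: rest, depth =>
      let d := depth + (if ch = '{' then 1 else -1)
      if ch = '}' ∧ d = 0 then
        (String.ofList (PySem.List.slice src (some (bp : Int)) (some ((i : Int) + 1))), (i : Int))
      else
        pvScan src bp rest d

def extract_function_body_py_alt (source : String) (start_pos : Int) : String × Int :=
  let cs := source.toList
  let brace := PySem.Str.findFrom source "{" start_pos none
  if brace = -1 then ("", start_pos)
  else pvScan cs brace.toNat (pvEvents (cs.drop brace.toNat) brace.toNat false none none) 0

-- ===== PRECONDITION & SPEC =====
def Spec_extract_function_body_py (source : String) (start_pos : Int) (out : String × Int) : Prop := out = extract_function_body_py_alt source start_pos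
instance (source : String) (start_pos : Int) (out : String × Int) : Decidable (Spec_extract_function_body_py source start_pos out) := by unfold Spec_extract_function_body_py; infer_instance

-- ===== CLAIM (what is proved, stated in full; the proofs are below) =====
def Claim_equal_extract_function_body_py : Prop := ∀ (source : String) (start_pos : Int), Dom_extract_function_body_py source start_pos → Spec_extract_function_body_py source start_pos (extract_function_body_py source start_pos)

-- ===== LEMMAS AND PROOFS =====

-- A's fused loop equals scanning the staged event list with the running depth.
theorem loopA_eq_scan_events (src : List Char) (bp : Nat) :
    ∀ (cs : List Char) (i : Nat) (d : Int) (inS : Bool) (sc p : Option Char),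
    pvLoopA src bp cs i d inS sc p = pvScan src bp (pvEvents cs i inS sc p) d := by
  intro cs
  induction cs with
  | nil => intro i d inS sc p; simp [pvLoopA, pvEvents, pvScan]
  | cons ch rest ih =>
      intro i d inS sc p
      rw [pvLoopA, pvEvents]
      cases inS with
      | true =>
          simp only [if_true]
          split
          · exact ih (i + 1) d false sc (some ch)
          · exact ih (i + 1) d true sc (some ch)
      | false =>
          simp only [if_false, Bool.false_eq_true]
          by_cases hq : ch = '"' ∨ ch = '\'' ∨ ch = '`'
          · rw [if_pos hq, if_pos hq]
            exact ih (i + 1) d true (some ch) (some ch)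
          · rw [if_neg hq, if_neg hq]
            by_cases ho : ch = '{'
            · rw [if_pos ho, if_pos (Or.inl ho), pvScan]
              have hne : ¬(ch = '}' ∧ d + (if ch = '{' then 1 else -1) = 0) := by
                subst ho; simp
              rw [if_pos ho] at hne ⊢
              rw [if_neg hne]
              exact ih (i + 1) (d + 1) false sc (some ch)
            · rw [if_neg ho]
              by_cases hc : ch = '}'
              · rw [if_pos hc, if_pos (Or.inr hc), pvScan]
                rw [if_neg ho]
                by_cases hd : d - 1 = 0
                · rw [if_pos hd, if_pos ⟨hc, by omega⟩]
                · rw [if_neg hd, if_neg (by intro h; exact hd (by omega))]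
                  have : d + -1 = d - 1 := by omega
                  rw [this]
                  exact ih (i + 1) (d - 1) false sc (some ch)
              · rw [if_neg hc, if_neg (by simp [ho, hc])]
                exact ih (i + 1) d false sc (some ch)

-- ===== VERDICT (by name: the statement is the Claim_ definition above) =====
theorem extract_function_body_py_spec : Claim_equal_extract_function_body_py := by
  intro source start_pos _
  unfold Spec_extract_function_body_py extract_function_body_py extract_function_body_py_alt
  simp only
  by_cases h : PySem.Str.findFrom source "{" start_pos none = -1
  · rw [if_pos h, if_pos h]
  · rw [if_neg h, if_neg h]
    exact loopA_eq_scan_events _ _ _ _ _ _ _ _
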